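-- pv_equiv track=rewrite | github.com/pypi-data/pypi-mirror-400 | packages/nanosurf/nanosurf-1.13.4-py3-none-any.whl/nanosurf/lib/datatypes/sci_val/unit_prefix.py | next_smaller_prefix_id
-- ===== SOURCE A (Python) =====
-- import enum
--
-- class Prefix(enum.IntEnum):
--     yotta =  0,
--     zetta =  1,
--     exa   =  2,
--     peta  =  3,
--     tera  =  4,
--     giga  =  5,
--     mega  =  6,
--     kilo  =  7,
--     base  =  8,
--     milli =  9,
--     micro = 10,
--     nano  = 11,
--     pico  = 12,
--     femto = 13,
--     atto  = 14,
--     zepto = 15,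
--     yocto = 16,
--     auto_ = 17,
--
-- default_prefix_range = [
--     Prefix.yotta,
--     Prefix.zetta,
--     Prefix.exa,
--     Prefix.peta,
--     Prefix.tera,
--     Prefix.giga,
--     Prefix.mega,
--     Prefix.kilo,
--     Prefix.base,
--     Prefix.milli,
--     Prefix.micro,
--     Prefix.nano,
--     Prefix.pico,
--     Prefix.femto,
--     Prefix.atto,
--     Prefix.zepto,
--     Prefix.yocto
-- ]
--
-- def next_smaller_prefix_id(prefix_id:Prefix):
--     if (prefix_id == Prefix.auto_) or (prefix_id == Prefix.yocto):
--         return prefix_id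
--     else:
--         for index,p in enumerate(default_prefix_range):
--             if p == prefix_id:
--                 return default_prefix_range[index + 1]
--     return  prefix_id
-- ===== SOURCE B (Python) =====
-- import enum
--
-- class Prefix(enum.IntEnum):
--     yotta =  0,
--     zetta =  1,
--     exa   =  2,
--     peta  =  3,
--     tera  =  4,
--     giga  =  5,
--     mega  =  6,
--     kilo  =  7,
--     base  =  8,
--     milli =  9,
--     micro = 10,
--     nano  = 11,
--     pico  = 12,
--     femto = 13,
--     atto  = 14,
--     zepto = 15,
--     yocto = 16,
--     auto_ = 17,
--
-- def next_smaller_prefix_id(prefix_id: Prefix):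
--     # Closed form: prefix values 0..15 are consecutive and value-ordered,
--     # so the "next smaller" prefix is simply value + 1; everything else
--     # (yocto, auto_, values outside the table) maps to itself.
--     if 0 <= prefix_id <= 15:
--         return Prefix(prefix_id + 1)
--     return prefix_id
-- ===== Notes on version B (the rewrite author's own statement) =====
-- stated objective: simpler
-- what changed: Replaced the linear enumerate-scan over the prefix table (plus explicit auto_/yocto special cases) with a closed-form arithmetic map: values 0..15 return value+1, everything else returns itself.
import Mathlib
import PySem

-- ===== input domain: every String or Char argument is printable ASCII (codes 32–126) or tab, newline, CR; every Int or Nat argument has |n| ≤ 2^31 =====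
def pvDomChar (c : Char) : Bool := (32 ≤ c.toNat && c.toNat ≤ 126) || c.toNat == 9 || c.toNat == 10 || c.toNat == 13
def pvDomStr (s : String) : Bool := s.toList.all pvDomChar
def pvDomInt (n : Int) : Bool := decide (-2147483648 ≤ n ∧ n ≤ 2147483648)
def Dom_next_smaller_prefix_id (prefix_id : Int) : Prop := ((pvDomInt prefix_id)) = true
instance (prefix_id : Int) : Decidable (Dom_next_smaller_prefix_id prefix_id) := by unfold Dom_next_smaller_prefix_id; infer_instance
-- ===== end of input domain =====

-- ===== PORT A =====
-- Header: B replaces A's table scan with a closed-form +1 map guarded to 0..15 (objective: simpler).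
-- The prefix table, as Int values (Prefix is an IntEnum).
def default_prefix_range : List Int :=
  [0, 1, 2, 3, 4, 5, 6, 7, 8, 9, 10, 11, 12, 13, 14, 15, 16]

-- the 'for index,p in enumerate(default_prefix_range): if p == prefix_id: return default_prefix_range[index+1]' loop;
-- the .getD default on the list access is never hit for matches found in the table (index+1 <= 16 only when p == 16 = yocto,
-- which the caller filters out), kept only to make the port total.
def pvScanA (prefix_id : Int) : List (Int × Int) → Int
  | [] => prefix_id
  | (i, p) :: rest =>
    if p == prefix_id then ((PySem.List.pyGet? default_prefix_range (i + 1)).getD prefix_id)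
    else pvScanA prefix_id rest

def next_smaller_prefix_id (prefix_id : Int) : Int :=
  if prefix_id == 17 || prefix_id == 16 then prefix_id
  else pvScanA prefix_id (PySem.List.enumerate default_prefix_range)

-- ===== PORT B =====
def next_smaller_prefix_id_alt (prefix_id : Int) : Int :=
  if 0 ≤ prefix_id ∧ prefix_id ≤ 15 then prefix_id + 1 else prefix_id

-- ===== PRECONDITION & SPEC =====
def Spec_next_smaller_prefix_id (prefix_id : Int) (out : Int) : Prop := out = next_smaller_prefix_id_alt prefix_id
instance (prefix_id : Int) (out : Int) : Decidable (Spec_next_smaller_prefix_id prefix_id out) := by unfold Spec_next_smaller_prefix_id; infer_instance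

-- ===== CLAIM (what is proved, stated in full; the proofs are below) =====
def Claim_equal_next_smaller_prefix_id : Prop := ∀ (prefix_id : Int), Dom_next_smaller_prefix_id prefix_id → Spec_next_smaller_prefix_id prefix_id (next_smaller_prefix_id prefix_id)

-- ===== LEMMAS AND PROOFS =====

-- ===== VERDICT (by name: the statement is the Claim_ definition above) =====
theorem pvScanA_no_match (p : Int) (l : List (Int × Int)) (h : ∀ q ∈ l, q.2 ≠ p) :
    pvScanA p l = p := by
  induction l with
  | nil => rfl
  | cons q rest ih =>
    obtain ⟨i, v⟩ := q
    have hv : v ≠ p := h (i, v) (List.mem_cons_self ..)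
    simp only [pvScanA, beq_iff_eq, if_neg hv]
    exact ih (fun q hq => h q (List.mem_cons_of_mem _ hq))

theorem next_smaller_prefix_id_spec : Claim_equal_next_smaller_prefix_id := by
  intro p _
  unfold Spec_next_smaller_prefix_id next_smaller_prefix_id next_smaller_prefix_id_alt
  by_cases h : 0 ≤ p ∧ p ≤ 16
  · -- p is one of the 17 table values: evaluate both sides
    obtain ⟨h1, h2⟩ := h
    interval_cases p <;> decide
  · -- p outside the table: A's guard does not fire (p ≠ 16, 17 unless p = 17) …
    by_cases h17 : p = 17
    · subst h17; decide
    · have hg : (p == 17 || p == 16) = false := by simp only [Bool.or_eq_false_iff, beq_eq_false_iff_ne, ne_eq]; omega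
      rw [hg, if_neg (by simp)]
      rw [pvScanA_no_match]
      · rw [if_neg (by omega)]
      · intro q hq
        have : q.2 ∈ default_prefix_range := by
          have := PySem.List.map_snd_enumerate (xs := default_prefix_range) (s := 0)
          rw [← this]
          exact List.mem_map_of_mem hq
        simp only [default_prefix_range, List.mem_cons, List.not_mem_nil, or_false] at this
        rcases this with h|h|h|h|h|h|h|h|h|h|h|h|h|h|h|h|h <;> omega
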